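-- pv_equiv track=rewrite | github.com/mircica10/pythonDataStructuresAndAlgorithms | arraySameAverage.py | dp
-- ===== SOURCE A (Python) =====
-- def dp(A):
--     if len(A) == 2:
--         return A[0] == A[1]
--     sum = 0
--     for i in A:
--         sum += i
--
--     max_n = 2
--     max_k = 16
--     max_s = 300001
--     #dp[n][k][s] means whether sum s could be achieved by summing up k numbers
--     # selected among the first n numbers in given array.
--     dp = [ [ [False for _ in range(max_s)] for _ in range(max_k) ] for _ in range(max_n) ]
--
--     N = len(A)
--
--     for n in range(N + 1):
--         dp[n & 1][0][0] = True
--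
--     for n in range(1, N + 1):
--         for k in range(1, N // 2 + 1):
--             for s in range(1, sum + 1):
--                 if s >= A[n - 1]:
--                     dp[n & 1][k][s] = dp[(n - 1) & 1][k][s] or dp[(n - 1) & 1][k - 1][s - A[n - 1]]
--                 else:
--                     dp[n & 1][k][s] = dp[(n - 1) & 1][k][s]
--
--     for k in range(1, N // 2 + 1):
--         if sum * k % N == 0 and dp[N & 1][k][sum * k // N]:
--             return True
--
--     return False
-- ===== SOURCE B (Python) =====
-- def _sized_sums(lst):
--     # all (size, sum) pairs over subsets of lst, by recursion on the list
--     if not lst: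
--         return [(0, 0)]
--     rest = _sized_sums(lst[1:])
--     return rest + [(k + 1, s + lst[0]) for k, s in rest]
--
-- def dp(A):
--     N = len(A)
--     if N < 2:
--         return False
--     total = sum(A)
--     left, right = A[:N // 2], A[N // 2:]
--     left_pairs = _sized_sums(left)
--     right_by_size = {}
--     for k, s in _sized_sums(right):
--         right_by_size.setdefault(k, set()).add(s)
--     for k in range(1, N // 2 + 1):
--         if total * k % N == 0:
--             target = total * k // N
--             for k1, s1 in left_pairs:
--                 if k1 <= k and target - s1 in right_by_size.get(k - k1, ()):
--                     return True
--     return False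
-- ===== Notes on version B (the rewrite author's own statement) =====
-- stated objective: alternative
-- what changed: Replaces A's rolling 2x16x300001 boolean DP over (prefix, count, every sum 1..total) by meet-in-the-middle: recursively enumerate the (size, sum) pairs of all subsets of each half of the array, hash the right half's sums by size, and for each candidate k look each left pair up in the right-half table; cost depends only on the length (2^(n/2)), not on the magnitude of the sums.
-- outside the precondition, e.g. on dp([0, 0, 0]): A returns False, B returns True; on dp([0, 10, 7, 4, 4]): A returns False, B returns True; on dp([-1, -1, -1]): A returns False, B returns True
import Mathlib
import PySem

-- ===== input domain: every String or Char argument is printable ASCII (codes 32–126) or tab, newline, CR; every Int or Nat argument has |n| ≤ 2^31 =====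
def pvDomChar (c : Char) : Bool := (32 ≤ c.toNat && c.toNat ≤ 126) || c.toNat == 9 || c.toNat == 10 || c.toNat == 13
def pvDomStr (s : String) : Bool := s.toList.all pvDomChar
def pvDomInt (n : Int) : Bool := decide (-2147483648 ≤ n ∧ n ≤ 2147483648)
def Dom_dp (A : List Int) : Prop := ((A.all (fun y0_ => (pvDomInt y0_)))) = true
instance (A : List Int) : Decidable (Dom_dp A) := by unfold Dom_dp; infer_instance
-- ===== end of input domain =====

-- B replaces A's rolling 2×16×300001 boolean DP table by meet-in-the-middle subset
-- enumeration over the two halves of the array (objective: alternative; equality of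
-- RETURN values).

-- ===== PORT A =====
-- A's 3D boolean table dp[2][16][300001] is modelled as a write log: each Python assignment
-- dp[p][k][s] = v appends ((p,k,s),v) and a read returns the most recent write (pvGet), i.e.
-- exactly the mutable array's last-write-wins contents; unwritten cells read False, the
-- table's initial value. On inputs admitted by Pre_dp every Python index is in bounds, so the
-- two representations hold the same values.
def pvUpd (t : List ((Nat × Nat × Int) × Bool)) (p k : Nat) (s : Int) (v : Bool) :
    List ((Nat × Nat × Int) × Bool) := ((p, k, s), v) :: t

def pvGet : List ((Nat × Nat × Int) × Bool) → Nat → Nat → Int → Bool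
  | [], _, _, _ => false
  | (c, v) :: t, p, k, s => if c = (p, k, s) then v else pvGet t p k s

def dp (A : List Int) : Bool :=
  if A.length = 2 then PySem.List.pyGet? A 0 == PySem.List.pyGet? A 1
  else
    let sum : Int := A.foldl (fun acc i => acc + i) 0
    let N := A.length
    let t0 : List ((Nat × Nat × Int) × Bool) := []
    let t1 := (List.range (N + 1)).foldl (fun t n => pvUpd t (n % 2) 0 0 true) t0
    let t2 := (List.range' 1 N).foldl (fun t n =>
      (List.range' 1 (N / 2)).foldl (fun t k =>
        (PySem.List.pyRange 1 (sum + 1) 1).foldl (fun t s =>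
          if A.getD (n - 1) 0 ≤ s then
            pvUpd t (n % 2) k s
              (pvGet t ((n - 1) % 2) k s ||
               pvGet t ((n - 1) % 2) (k - 1) (s - A.getD (n - 1) 0))
          else
            pvUpd t (n % 2) k s (pvGet t ((n - 1) % 2) k s)) t) t) t1
    (List.range' 1 (N / 2)).any (fun k =>
      PySem.Int.mod (sum * (k : Int)) (A.length : Int) == 0 &&
      pvGet t2 (N % 2) k (PySem.Int.floordiv (sum * (k : Int)) (A.length : Int)))

-- ===== PORT B =====
-- _sized_sums: all (size, sum) pairs of subsets of lst, by recursion on the list.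
def pvSizedSums : List Int → List (Int × Int)
  | [] => [(0, 0)]
  | a :: l =>
    let rest := pvSizedSums l
    rest ++ rest.map (fun p => (p.1 + 1, p.2 + a))

def dp_alt (A : List Int) : Bool :=
  let N := A.length
  if N < 2 then false
  else
    let total : Int := A.foldl (fun acc i => acc + i) 0
    let left := PySem.List.slice A none (some ((N / 2 : Nat) : Int))
    let right := PySem.List.slice A (some ((N / 2 : Nat) : Int)) none
    let leftPairs := pvSizedSums left
    -- right_by_size.setdefault(k, set()).add(s)  ≡  d[k] = d.get(k, set()).add(s) = Dict.modify
    let rightBySize := (pvSizedSums right).foldl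
      (fun d p => d.modify p.1 PySem.Set.empty (fun st => PySem.Set.add st p.2))
      (PySem.Dict.empty : PySem.Dict Int (PySem.Set Int))
    (List.range' 1 (N / 2)).any (fun k =>
      PySem.Int.mod (total * (k : Int)) (N : Int) == 0 &&
      (let target := PySem.Int.floordiv (total * (k : Int)) (N : Int)
       leftPairs.any (fun p =>
         p.1 ≤ (k : Int) &&
         PySem.Set.contains (rightBySize.getD ((k : Int) - p.1) PySem.Set.empty)
           (target - p.2))))

-- ===== PRECONDITION & SPEC =====
-- Pre_dp admits every list of length ≤ 2 (A answers those before/without touching its table) and,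
-- for longer lists, exactly the all-positive inputs fitting A's fixed 2×16×300001 table: with a
-- zero or negative element A's DP (which tracks sums only in [1, total] and wrap-indexes negative
-- targets) silently drops valid subsets where it returns at all, and with total > 300000 or
-- length > 31 A raises IndexError.
def Pre_dp (A : List Int) : Prop :=
  A.length ≤ 2 ∨ ((∀ a ∈ A, 1 ≤ a) ∧ A.sum ≤ 300000 ∧ A.length ≤ 31)
instance (A : List Int) : Decidable (Pre_dp A) := by unfold Pre_dp; infer_instance

def pvWitness_dp : List Int := [1, 2, 3]

def Spec_dp (A : List Int) (out : Bool) : Prop := out = dp_alt A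
instance (A : List Int) (out : Bool) : Decidable (Spec_dp A out) := by
  unfold Spec_dp; infer_instance

-- ===== CLAIM (what is proved, stated in full; the proofs are below) =====
def Claim_equal_dp : Prop := ∀ (A : List Int), Dom_dp A → Pre_dp A → Spec_dp A (dp A)

-- ===== LEMMAS AND PROOFS =====

-- pvG l k s: "some subset of l of size k sums to s" (clean structural recursion both ports meet).
def pvG : List Int → Nat → Int → Bool
  | [], k, s => k == 0 && s == 0
  | a :: l, k, s =>
    pvG l k s || (match k with
      | 0 => false
      | k' + 1 => pvG l k' (s - a))

lemma pvG_zero (l : List Int) (s : Int) : pvG l 0 s = decide (s = 0) := by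
  induction l with
  | nil => by_cases h : s = 0 <;> simp [pvG, h]
  | cons a l ih => simp [pvG, ih]

lemma pvG_pos_false (l : List Int) (k : Nat) (s : Int)
    (h : ∀ x ∈ l, 1 ≤ x) (hs : s < (k : Int)) : pvG l k s = false := by
  induction l generalizing k s with
  | nil =>
    cases k with
    | zero => simp [pvG]; omega
    | succ k => simp [pvG]
  | cons a l ih =>
    have ha : (1 : Int) ≤ a := h a (by simp)
    have h' : ∀ x ∈ l, (1 : Int) ≤ x := fun x hx => h x (by simp [hx])
    cases k with
    | zero => simp [pvG, pvG_zero]; omega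
    | succ k =>
      simp only [pvG]
      rw [ih _ _ h' hs, ih _ _ h' (by push_cast at hs ⊢; omega)]
      rfl

lemma pvGet_upd (t : List ((Nat × Nat × Int) × Bool)) (p k : Nat) (s : Int) (v : Bool)
    (p' k' : Nat) (s' : Int) :
    pvGet (pvUpd t p k s v) p' k' s'
      = if p' = p ∧ k' = k ∧ s' = s then v else pvGet t p' k' s' := by
  show (if (p, k, s) = (p', k', s') then v else pvGet t p' k' s') = _
  by_cases h : p' = p ∧ k' = k ∧ s' = s
  · obtain ⟨rfl, rfl, rfl⟩ := h
    simp
  · rw [if_neg (by rintro hc; cases hc; exact h ⟨rfl, rfl, rfl⟩), if_neg h]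

-- The s-loop of A's DP writes row (pcur, k) at every s ∈ ss, reading only parity pold.
lemma pvA_inner (pcur pold : Nat) (hne : pold ≠ pcur) (a : Int) (k : Nat) :
    ∀ (ss : List Int) (t : List ((Nat × Nat × Int) × Bool)) (p' k' : Nat) (s' : Int),
    pvGet (ss.foldl (fun t s =>
        if a ≤ s then pvUpd t pcur k s (pvGet t pold k s || pvGet t pold (k - 1) (s - a))
        else pvUpd t pcur k s (pvGet t pold k s)) t) p' k' s'
    = if p' = pcur ∧ k' = k ∧ s' ∈ ss then
          (if a ≤ s' then pvGet t pold k s' || pvGet t pold (k - 1) (s' - a)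
           else pvGet t pold k s')
        else pvGet t p' k' s' := by
  intro ss
  induction ss with
  | nil => intro t p' k' s'; simp
  | cons s0 rest ih =>
    intro t p' k' s'
    have hbody : (if a ≤ s0 then
          pvUpd t pcur k s0 (pvGet t pold k s0 || pvGet t pold (k - 1) (s0 - a))
        else pvUpd t pcur k s0 (pvGet t pold k s0))
        = pvUpd t pcur k s0
            (if a ≤ s0 then pvGet t pold k s0 || pvGet t pold (k - 1) (s0 - a)
             else pvGet t pold k s0) := by
      by_cases ha : a ≤ s0 <;> simp [ha]
    simp only [List.foldl_cons]
    rw [hbody, ih]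
    by_cases hp : p' = pcur <;> by_cases hk : k' = k <;>
      by_cases hm : s' ∈ rest <;> by_cases hs0 : s' = s0 <;>
        simp [pvGet_upd, hp, hk, hm, hs0, hne, List.mem_cons]

-- The k-loop: writes parity pcur over all rows k ∈ ks, reads only parity pold.
lemma pvA_mid (pcur pold : Nat) (hne : pold ≠ pcur) (a : Int) (ss : List Int) :
    ∀ (ks : List Nat) (t : List ((Nat × Nat × Int) × Bool)) (p' k' : Nat) (s' : Int),
    pvGet (ks.foldl (fun t k => ss.foldl (fun t s =>
        if a ≤ s then pvUpd t pcur k s (pvGet t pold k s || pvGet t pold (k - 1) (s - a))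
        else pvUpd t pcur k s (pvGet t pold k s)) t) t) p' k' s'
    = if p' = pcur ∧ k' ∈ ks ∧ s' ∈ ss then
          (if a ≤ s' then pvGet t pold k' s' || pvGet t pold (k' - 1) (s' - a)
           else pvGet t pold k' s')
        else pvGet t p' k' s' := by
  intro ks
  induction ks with
  | nil => intro t p' k' s'; simp
  | cons k0 rest ih =>
    intro t p' k' s'
    simp only [List.foldl_cons]
    rw [ih]
    by_cases hp : p' = pcur <;> by_cases hk0 : k' = k0 <;>
      by_cases hkm : k' ∈ rest <;> by_cases hsm : s' ∈ ss <;>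
        simp [pvA_inner pcur pold hne a k0 ss t, hp, hk0, hkm, hsm, hne, List.mem_cons]

lemma pvInit_char : ∀ (ns : List Nat) (t : List ((Nat × Nat × Int) × Bool)) (p k : Nat) (s : Int),
    pvGet (ns.foldl (fun t n => pvUpd t (n % 2) 0 0 true) t) p k s
    = if k = 0 ∧ s = 0 ∧ (∃ n ∈ ns, n % 2 = p) then true else pvGet t p k s := by
  intro ns
  induction ns with
  | nil => intro t p k s; simp
  | cons n0 rest ih =>
    intro t p k s
    simp only [List.foldl_cons]
    rw [ih]
    by_cases hk : k = 0 <;> by_cases hs : s = 0 <;>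
      by_cases hr : ∃ n ∈ rest, n % 2 = p <;> by_cases hp : n0 % 2 = p <;>
        simp [pvGet_upd, hk, hs, hr, hp, eq_comm (a := p)]

lemma pv_sum_ge_len (A : List Int) (hp : ∀ x ∈ A, 1 ≤ x) :
    (A.length : Int) ≤ A.foldl (fun acc i => acc + i) 0 := by
  suffices h : ∀ (init : Int), init + A.length ≤ A.foldl (fun acc i => acc + i) init by
    have := h 0; omega
  induction A with
  | nil => intro init; simp
  | cons a l ih =>
    intro init
    have ha : (1 : Int) ≤ a := hp a (by simp)
    have := ih (fun x hx => hp x (by simp [hx])) (init + a)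
    simp only [List.foldl_cons, List.length_cons]
    push_cast
    push_cast at this
    omega

def pvS (A : List Int) : Int := A.foldl (fun acc i => acc + i) 0

-- A's table (write log) after the init loop and the first m outer iterations.
def pvAtab (A : List Int) (m : Nat) : List ((Nat × Nat × Int) × Bool) :=
  (List.range' 1 m).foldl (fun t n =>
    (List.range' 1 (A.length / 2)).foldl (fun t k =>
      (PySem.List.pyRange 1 (pvS A + 1) 1).foldl (fun t s =>
        if A.getD (n - 1) 0 ≤ s then
          pvUpd t (n % 2) k s
            (pvGet t ((n - 1) % 2) k s ||
             pvGet t ((n - 1) % 2) (k - 1) (s - A.getD (n - 1) 0))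
        else
          pvUpd t (n % 2) k s (pvGet t ((n - 1) % 2) k s)) t) t)
    ((List.range (A.length + 1)).foldl (fun t n => pvUpd t (n % 2) 0 0 true) [])

lemma pv_dp_eq (A : List Int) (h : ¬ A.length = 2) :
    dp A = (List.range' 1 (A.length / 2)).any (fun k =>
      PySem.Int.mod (pvS A * (k : Int)) (A.length : Int) == 0 &&
      pvGet (pvAtab A A.length) (A.length % 2) k
        (PySem.Int.floordiv (pvS A * (k : Int)) (A.length : Int))) := by
  rw [dp, if_neg h]
  rfl

lemma pvA_loop (A : List Int) (hp : ∀ x ∈ A, 1 ≤ x) (hN : 1 ≤ A.length) :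
    ∀ m, m ≤ A.length →
    (∀ p k (s : Int), p ≤ 1 →
        ¬(1 ≤ k ∧ k ≤ A.length / 2 ∧ 1 ≤ s ∧ s ≤ pvS A) →
        pvGet (pvAtab A m) p k s = decide (k = 0 ∧ s = 0)) ∧
    (∀ k (s : Int), (1 ≤ k ∧ k ≤ A.length / 2 ∧ 1 ≤ s ∧ s ≤ pvS A) →
        pvGet (pvAtab A m) (m % 2) k s = pvG ((A.take m).reverse) k s) := by
  intro m
  induction m with
  | zero =>
    intro _
    constructor
    · intro p k s hple hnr
      unfold pvAtab
      rw [List.range'_zero, List.foldl_nil, pvInit_char]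
      by_cases hks : k = 0 ∧ s = 0
      · obtain ⟨rfl, rfl⟩ := hks
        rw [if_pos ⟨rfl, rfl, p, List.mem_range.mpr (by omega), by omega⟩]
        simp
      · rw [if_neg (by rintro ⟨h1, h2, -⟩; exact hks ⟨h1, h2⟩)]
        simp only [decide_eq_false hks, pvGet]
    · intro k s hr
      unfold pvAtab
      rw [List.range'_zero, List.foldl_nil, pvInit_char]
      rw [if_neg (by rintro ⟨h1, -⟩; omega)]
      obtain ⟨k', rfl⟩ : ∃ k'', k = k'' + 1 := ⟨k - 1, by omega⟩
      simp [List.take_zero, pvG, pvGet]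
  | succ m ih =>
    intro hm1
    have hm' : m < A.length := by omega
    obtain ⟨IH1, IH2⟩ := ih (by omega)
    have hp' : ∀ x ∈ (A.take m).reverse, (1 : Int) ≤ x := fun x hx =>
      hp x (List.mem_of_mem_take (List.mem_reverse.mp hx))
    have ha1 : (1 : Int) ≤ A.getD m 0 := by
      refine hp _ ?_
      rw [List.getD_eq_getElem A 0 hm']
      exact List.getElem_mem hm'
    have htab : ∀ p' k' (s' : Int), pvGet (pvAtab A (m + 1)) p' k' s'
        = if p' = (m + 1) % 2 ∧ k' ∈ List.range' 1 (A.length / 2)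
              ∧ s' ∈ PySem.List.pyRange 1 (pvS A + 1) 1 then
            (if A.getD m 0 ≤ s' then
              pvGet (pvAtab A m) (m % 2) k' s' ||
                pvGet (pvAtab A m) (m % 2) (k' - 1) (s' - A.getD m 0)
            else pvGet (pvAtab A m) (m % 2) k' s')
          else pvGet (pvAtab A m) p' k' s' := by
      intro p' k' s'
      conv_lhs => rw [pvAtab, List.range'_1_concat, List.foldl_append,
        List.foldl_cons, List.foldl_nil]
      have := pvA_mid ((m + 1) % 2) (m % 2) (by omega) (A.getD m 0)
        (PySem.List.pyRange 1 (pvS A + 1) 1) (List.range' 1 (A.length / 2))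
        (pvAtab A m) p' k' s'
      simp only [Nat.add_comm 1 m] at *
      exact this
    have htake : (A.take (m + 1)).reverse = A.getD m 0 :: (A.take m).reverse := by
      have hgd : A.getD m 0 = A[m] := List.getD_eq_getElem A 0 hm'
      rw [List.take_add_one, List.getElem?_eq_getElem hm', hgd]
      simp
    constructor
    · intro p k s hple hnr
      rw [htab]
      rw [if_neg (by
        rintro ⟨-, hk, hs⟩
        rw [List.mem_range'_1] at hk
        rw [PySem.List.mem_pyRange_one] at hs
        exact hnr ⟨by omega, by omega, by omega, by omega⟩)]
      exact IH1 p k s hple hnr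
    · intro k s hr
      obtain ⟨hk1, hk2, hs1, hs2⟩ := hr
      obtain ⟨k', rfl⟩ : ∃ k'', k = k'' + 1 := ⟨k - 1, by omega⟩
      rw [htab]
      rw [if_pos ⟨by trivial, List.mem_range'_1.mpr (by omega),
        PySem.List.mem_pyRange_one.mpr (by omega)⟩]
      simp only [Nat.add_sub_cancel]
      have hmain : pvGet (pvAtab A m) (m % 2) (k' + 1) s
          = pvG ((A.take m).reverse) (k' + 1) s :=
        IH2 (k' + 1) s ⟨hk1, hk2, hs1, hs2⟩
      rw [htake]
      by_cases hle : A.getD m 0 ≤ s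
      · rw [if_pos hle]
        have hread : pvGet (pvAtab A m) (m % 2) k' (s - A.getD m 0)
            = pvG ((A.take m).reverse) k' (s - A.getD m 0) := by
          by_cases hk'0 : k' = 0
          · subst hk'0
            rw [IH1 (m % 2) 0 (s - A.getD m 0) (by omega) (by rintro ⟨h, -⟩; omega)]
            rw [pvG_zero]
            simp
          · by_cases hsa : 1 ≤ s - A.getD m 0
            · exact IH2 k' (s - A.getD m 0) ⟨by omega, by omega, hsa, by omega⟩
            · rw [IH1 (m % 2) k' (s - A.getD m 0) (by omega)
                (by rintro ⟨-, -, h, -⟩; exact hsa h)]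
              rw [pvG_pos_false _ _ _ hp' (by
                have : 1 ≤ (k' : Int) := by exact_mod_cast Nat.one_le_iff_ne_zero.mpr hk'0
                omega)]
              simp [hk'0]
        rw [hmain, hread]
        simp only [pvG]
      · rw [if_neg hle]
        have hfalse : pvG ((A.take m).reverse) k' (s - A.getD m 0) = false := by
          by_cases hk'0 : k' = 0
          · subst hk'0
            rw [pvG_zero]
            exact decide_eq_false (by omega)
          · refine pvG_pos_false _ _ _ hp' ?_
            have : 1 ≤ (k' : Int) := by exact_mod_cast Nat.one_le_iff_ne_zero.mpr hk'0
            omega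
        rw [hmain]
        simp only [pvG, hfalse, Bool.or_false]

lemma pvA_char (A : List Int) (hp : ∀ x ∈ A, 1 ≤ x) (hlen : ¬ A.length = 2) :
    dp A = true ↔ ∃ k ∈ List.range' 1 (A.length / 2),
      PySem.Int.mod (pvS A * (k : Int)) (A.length : Int) = 0 ∧
      pvG A.reverse k (PySem.Int.floordiv (pvS A * (k : Int)) (A.length : Int)) = true := by
  rw [pv_dp_eq A hlen, List.any_eq_true]
  have hcell : ∀ k ∈ List.range' 1 (A.length / 2),
      PySem.Int.mod (pvS A * (k : Int)) (A.length : Int) = 0 →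
      pvGet (pvAtab A A.length) (A.length % 2) k
        (PySem.Int.floordiv (pvS A * (k : Int)) (A.length : Int))
      = pvG A.reverse k (PySem.Int.floordiv (pvS A * (k : Int)) (A.length : Int)) := by
    intro k hk hmod
    rw [List.mem_range'_1] at hk
    have hN2 : 1 ≤ A.length / 2 := by omega
    have hN : 3 ≤ A.length := by omega
    have hNpos : (0 : Int) < (A.length : Int) := by exact_mod_cast (by omega : 0 < A.length)
    have hS : (A.length : Int) ≤ pvS A := pv_sum_ge_len A hp
    have hk1 : (1 : Int) ≤ (k : Int) := by exact_mod_cast hk.1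
    have hkN : (k : Int) ≤ (A.length : Int) := by
      have hd := Nat.div_le_self A.length 2
      have : k ≤ A.length := by omega
      exact_mod_cast this
    have htgt1 : 1 ≤ PySem.Int.floordiv (pvS A * (k : Int)) (A.length : Int) := by
      rw [PySem.Int.le_floordiv_iff_mul_le hNpos]
      nlinarith
    have htgt2 : PySem.Int.floordiv (pvS A * (k : Int)) (A.length : Int) ≤ pvS A := by
      have := (PySem.Int.floordiv_lt_iff_lt_mul
        (a := pvS A * (k : Int)) (b := (A.length : Int)) (q := pvS A + 1) hNpos).mpr
        (by nlinarith)
      omega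
    have := (pvA_loop A hp (by omega) A.length (le_refl _)).2 k
      (PySem.Int.floordiv (pvS A * (k : Int)) (A.length : Int))
      ⟨hk.1, by omega, htgt1, htgt2⟩
    rw [this, List.take_length]
  constructor
  · rintro ⟨k, hk, hb⟩
    rw [Bool.and_eq_true, beq_iff_eq] at hb
    exact ⟨k, hk, hb.1, by rw [← hcell k hk hb.1]; exact hb.2⟩
  · rintro ⟨k, hk, hmod, hG⟩
    refine ⟨k, hk, ?_⟩
    rw [Bool.and_eq_true, beq_iff_eq]
    exact ⟨hmod, by rw [hcell k hk hmod]; exact hG⟩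

-- ----- B-side lemmas -----

-- (kk, s) is listed by _sized_sums l exactly when a size-kk subset of l sums to s.
lemma pv_mem_sizedSums (l : List Int) (kk s : Int) :
    (kk, s) ∈ pvSizedSums l ↔ ∃ k : Nat, kk = (k : Int) ∧ pvG l k s = true := by
  induction l generalizing kk s with
  | nil =>
    simp only [pvSizedSums, List.mem_singleton, Prod.mk.injEq]
    constructor
    · rintro ⟨rfl, rfl⟩
      exact ⟨0, rfl, by simp [pvG]⟩
    · rintro ⟨k, rfl, hG⟩
      simp only [pvG, Bool.and_eq_true, beq_iff_eq] at hG
      obtain ⟨h1, h2⟩ := hG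
      exact ⟨by exact_mod_cast congrArg (Nat.cast : Nat → Int) h1, h2⟩
  | cons a l ih =>
    simp only [pvSizedSums, List.mem_append, List.mem_map]
    constructor
    · rintro (h | ⟨⟨k', s'⟩, hmem, heq⟩)
      · obtain ⟨k, rfl, hG⟩ := (ih _ _).mp h
        exact ⟨k, rfl, by simp [pvG, hG]⟩
      · obtain ⟨k, rfl, hG⟩ := (ih k' s').mp hmem
        obtain ⟨h1, h2⟩ := Prod.mk.injEq .. ▸ heq
        refine ⟨k + 1, by push_cast; omega, ?_⟩
        have hs' : s' = s - a := by omega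
        subst hs'
        simp [pvG, hG]
    · rintro ⟨k, rfl, hG⟩
      cases k with
      | zero =>
        simp only [pvG, Bool.or_eq_true] at hG
        rcases hG with hG | hG
        · exact Or.inl ((ih _ _).mpr ⟨0, rfl, hG⟩)
        · simp at hG
      | succ k' =>
        simp only [pvG, Bool.or_eq_true] at hG
        rcases hG with hG | hG
        · exact Or.inl ((ih _ _).mpr ⟨k' + 1, rfl, hG⟩)
        · refine Or.inr ⟨((k' : Int), s - a), (ih _ _).mpr ⟨k', rfl, hG⟩, ?_⟩
          simp only [Prod.mk.injEq]
          constructor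
          · push_cast; ring
          · ring

-- A subset of l1 ++ l2 splits into a subset of l1 and a subset of l2.
lemma pvG_append (l1 l2 : List Int) (k : Nat) (s : Int) :
    pvG (l1 ++ l2) k s = true ↔
      ∃ (k1 k2 : Nat) (s1 s2 : Int), k1 + k2 = k ∧ s1 + s2 = s ∧
        pvG l1 k1 s1 = true ∧ pvG l2 k2 s2 = true := by
  induction l1 generalizing k s with
  | nil =>
    simp only [List.nil_append]
    constructor
    · intro h
      exact ⟨0, k, 0, s, by omega, by omega, by simp [pvG], h⟩
    · rintro ⟨k1, k2, s1, s2, hk, hs, h1, h2⟩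
      simp only [pvG, Bool.and_eq_true, beq_iff_eq] at h1
      obtain ⟨rfl, rfl⟩ := h1
      have : k2 = k := by omega
      subst this
      have : s2 = s := by omega
      subst this
      exact h2
  | cons a l1 ih =>
    simp only [List.cons_append]
    constructor
    · intro h
      simp only [pvG, Bool.or_eq_true] at h
      rcases h with h | h
      · obtain ⟨k1, k2, s1, s2, hk, hs, h1, h2⟩ := (ih _ _).mp h
        exact ⟨k1, k2, s1, s2, hk, hs, by simp [pvG, h1], h2⟩
      · cases k with
        | zero => simp at h
        | succ k' =>
          obtain ⟨k1, k2, s1, s2, hk, hs, h1, h2⟩ := (ih _ _).mp h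
          refine ⟨k1 + 1, k2, s1 + a, s2, by omega, by omega, ?_, h2⟩
          have : s1 + a - a = s1 := by ring
          simp [pvG, this, h1]
    · rintro ⟨k1, k2, s1, s2, hk, hs, h1, h2⟩
      simp only [pvG, Bool.or_eq_true] at h1 ⊢
      rcases h1 with h1 | h1
      · exact Or.inl ((ih _ _).mpr ⟨k1, k2, s1, s2, hk, hs, h1, h2⟩)
      · cases k1 with
        | zero => simp at h1
        | succ k1' =>
          cases k with
          | zero => omega
          | succ k' =>
            refine Or.inr ?_
            refine (ih _ _).mpr ⟨k1', k2, s1 - a, s2, by omega, by omega, h1, h2⟩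

lemma pvG_singleton (a : Int) (k : Nat) (s : Int) :
    pvG [a] k s = ((k == 0 && s == 0) || (k == 1 && s == a)) := by
  match k with
  | 0 => simp [pvG]
  | 1 =>
    simp only [pvG]
    by_cases h : s = a
    · simp [h]
    · have h' : ¬ s - a = 0 := by omega
      simp [h, h']
  | (n + 2) => simp [pvG]

lemma pvG_concat (l : List Int) (a : Int) (k : Nat) (s : Int) :
    pvG (l ++ [a]) k s = pvG (a :: l) k s := by
  rw [Bool.eq_iff_iff, pvG_append]
  constructor
  · rintro ⟨k1, k2, s1, s2, hk, hs, h1, h2⟩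
    rw [pvG_singleton] at h2
    simp only [Bool.or_eq_true, Bool.and_eq_true, beq_iff_eq] at h2
    rcases h2 with ⟨hk2, hs2⟩ | ⟨hk2, hs2⟩
    · have hk1 : k1 = k := by omega
      subst hk1
      have hs1 : s1 = s := by omega
      subst hs1
      simp [pvG, h1]
    · cases k with
      | zero => omega
      | succ k' =>
        have hk1 : k1 = k' := by omega
        subst hk1
        have hs1 : s1 = s - a := by omega
        subst hs1
        simp [pvG, h1]
  · intro h
    simp only [pvG, Bool.or_eq_true] at h
    rcases h with h | h
    · exact ⟨k, 0, s, 0, by omega, by omega, h, by simp [pvG_singleton]⟩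
    · cases k with
      | zero => simp at h
      | succ k' =>
        exact ⟨k', 1, s - a, a, by omega, by omega, h, by simp [pvG_singleton]⟩

lemma pvG_reverse (l : List Int) (k : Nat) (s : Int) :
    pvG l.reverse k s = pvG l k s := by
  induction l generalizing k s with
  | nil => rfl
  | cons a l ih =>
    rw [List.reverse_cons, pvG_concat]
    cases k with
    | zero => simp only [pvG, ih]
    | succ k' => simp only [pvG, ih]

-- The grouping loop: s is in the bucket of kk iff (kk, s) was among the pairs.
lemma pvDict_char (ps : List (Int × Int)) (d : PySem.Dict Int (PySem.Set Int))
    (kk s : Int) :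
    (s ∈ (ps.foldl (fun d p => d.modify p.1 PySem.Set.empty
            (fun st => PySem.Set.add st p.2)) d).getD kk PySem.Set.empty)
      ↔ (kk, s) ∈ ps ∨ s ∈ d.getD kk PySem.Set.empty := by
  induction ps generalizing d with
  | nil => simp
  | cons p ps ih =>
    simp only [List.foldl_cons]
    rw [ih, PySem.Dict.getD_modify, List.mem_cons]
    by_cases hk : kk = p.1
    · subst hk
      rw [if_pos rfl, PySem.Set.mem_add,
        show (((p.1 : Int), s) = p) ↔ s = p.2 from by simp [Prod.ext_iff]]
      tauto
    · rw [if_neg hk]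
      have hne : ¬ ((kk, s) = p) := fun h => hk (congrArg Prod.fst h)
      simp only [hne, false_or]

lemma pvB_char (A : List Int) (h2 : 2 ≤ A.length) :
    dp_alt A = true ↔ ∃ k ∈ List.range' 1 (A.length / 2),
      PySem.Int.mod (pvS A * (k : Int)) (A.length : Int) = 0 ∧
      pvG A k (PySem.Int.floordiv (pvS A * (k : Int)) (A.length : Int)) = true := by
  have hsplit : A.take (A.length / 2) ++ A.drop (A.length / 2) = A := List.take_append_drop ..
  have happ : ∀ (k : Nat) (t : Int), pvG A k t = true ↔
      ∃ (k1 k2 : Nat) (s1 s2 : Int), k1 + k2 = k ∧ s1 + s2 = t ∧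
        pvG (A.take (A.length / 2)) k1 s1 = true ∧
        pvG (A.drop (A.length / 2)) k2 s2 = true := by
    intro k t
    have h := pvG_append (A.take (A.length / 2)) (A.drop (A.length / 2)) k t
    rwa [hsplit] at h
  rw [dp_alt]
  simp only
  rw [if_neg (by omega)]
  rw [PySem.List.slice_to_natCast, PySem.List.slice_from_natCast]
  rw [List.any_eq_true]
  constructor
  · rintro ⟨k, hk, hb⟩
    rw [Bool.and_eq_true, beq_iff_eq] at hb
    obtain ⟨hmod, hin⟩ := hb
    rw [List.any_eq_true] at hin
    obtain ⟨p, hpmem, hpb⟩ := hin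
    rw [Bool.and_eq_true, decide_eq_true_eq, PySem.Set.contains_iff] at hpb
    obtain ⟨hle, hset⟩ := hpb
    rw [pvDict_char] at hset
    rcases hset with hset | hset
    swap
    · simp [PySem.Dict.getD_empty] at hset
    obtain ⟨k1, hk1, hG1⟩ := (pv_mem_sizedSums ..).mp hpmem
    obtain ⟨k2, hk2, hG2⟩ := (pv_mem_sizedSums ..).mp hset
    refine ⟨k, hk, hmod, ?_⟩
    rw [happ]
    exact ⟨k1, k2, p.2,
      PySem.Int.floordiv (pvS A * (k : Int)) (A.length : Int) - p.2,
      by omega, by ring, hG1, hG2⟩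
  · rintro ⟨k, hk, hmod, hG⟩
    rw [happ] at hG
    obtain ⟨k1, k2, s1, s2, hksum, hssum, hG1, hG2⟩ := hG
    refine ⟨k, hk, ?_⟩
    rw [Bool.and_eq_true, beq_iff_eq]
    refine ⟨hmod, ?_⟩
    rw [List.any_eq_true]
    refine ⟨((k1 : Int), s1), (pv_mem_sizedSums ..).mpr ⟨k1, rfl, hG1⟩, ?_⟩
    rw [Bool.and_eq_true, decide_eq_true_eq, PySem.Set.contains_iff]
    constructor
    · show (k1 : Int) ≤ (k : Int)
      exact_mod_cast Nat.le.intro hksum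
    · rw [pvDict_char]
      refine Or.inl ?_
      have hk2' : (k : Int) - (k1 : Int) = (k2 : Int) := by omega
      have hs2' : PySem.Int.floordiv (pvS A * (k : Int)) (A.length : Int) - s1 = s2 := by
        omega
      rw [hk2']
      have hpair : ((k2 : Int),
          PySem.Int.floordiv (List.foldl (fun acc i => acc + i) 0 A * (k : Int))
            (A.length : Int) - (((k1 : Int), s1) : Int × Int).2) = ((k2 : Int), s2) := by
        refine Prod.ext rfl ?_
        exact hs2'
      rw [hpair]
      exact (pv_mem_sizedSums ..).mpr ⟨k2, rfl, hG2⟩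

lemma pv_nil : dp [] = false := by decide

lemma pv_singleton (x : Int) : dp [x] = false := by
  rw [pv_dp_eq [x] (by simp)]
  simp

lemma pv_alt_small (A : List Int) (h : A.length < 2) : dp_alt A = false := by
  rw [dp_alt, if_pos h]

lemma pv_pair_A (a b : Int) : dp [a, b] = (a == b) := by
  rw [dp]
  rw [if_pos (by simp)]
  simp [PySem.List.pyGet?, PySem.List.pyIdx?]

lemma pv_pair_B (a b : Int) : dp_alt [a, b] = (a == b) := by
  have hchar := pvB_char [a, b] (by simp)
  have hG : ∀ t : Int, pvG ([a, b] : List Int) 1 t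
      = ((t - b == 0) || (t - a == 0)) := by
    intro t
    simp [pvG]
  have hL : (([a, b].length : Nat) : Int) = 2 := by norm_num
  by_cases hab : a = b
  · subst hab
    have hdp : dp_alt [a, a] = true := by
      rw [hchar]
      refine ⟨1, by simp, ?_, ?_⟩
      · rw [show (([a, a].length : Nat) : Int) = 2 from by norm_num,
          PySem.Int.mod_eq_emod_of_pos (by norm_num)]
        show (0 + a + a) * ((1 : Nat) : Int) % 2 = 0
        rw [Nat.cast_one]
        omega
      · rw [hG]
        have hfd : PySem.Int.floordiv (pvS [a, a] * ((1 : Nat) : Int))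
            (([a, a].length : Nat) : Int) = a := by
          rw [show (([a, a].length : Nat) : Int) = 2 from by norm_num,
            PySem.Int.floordiv_eq_ediv_of_pos (by norm_num)]
          show (0 + a + a) * ((1 : Nat) : Int) / 2 = a
          rw [Nat.cast_one]
          omega
        rw [hfd]
        simp
    rw [hdp]
    simp
  · have hnot : ¬ dp_alt [a, b] = true := by
      rw [hchar]
      rintro ⟨k, hk, hmod, hGt⟩
      have hk1 : k = 1 := by
        rw [List.mem_range'_1] at hk
        rw [show [a, b].length / 2 = 1 from by norm_num] at hk
        omega
      subst hk1
      rw [hG] at hGt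
      rw [hL, PySem.Int.mod_eq_emod_of_pos (by norm_num)] at hmod
      rw [hL, PySem.Int.floordiv_eq_ediv_of_pos (by norm_num)] at hGt
      rw [show pvS [a, b] = 0 + a + b from rfl, Nat.cast_one] at hmod hGt
      rcases Bool.or_eq_true _ _ |>.mp hGt with h | h <;>
        · rw [beq_iff_eq] at h
          apply hab
          omega
    have hb : (a == b) = false := beq_eq_false_iff_ne.mpr hab
    rw [hb]
    cases hA : dp_alt [a, b] with
    | false => rfl
    | true => exact absurd hA hnot

-- ===== VERDICT (by name: the statement is the Claim_ definition above) =====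
theorem dp_spec : Claim_equal_dp := by
  intro A hdom hpre
  unfold Spec_dp
  match A with
  | [] => rw [pv_nil, pv_alt_small [] (by simp)]
  | [x] => rw [pv_singleton x, pv_alt_small [x] (by simp)]
  | [a, b] => rw [pv_pair_A a b, pv_pair_B a b]
  | a :: b :: c :: rest =>
    have hlen' : (a :: b :: c :: rest).length = rest.length + 1 + 1 + 1 := by
      simp only [List.length_cons]
    have hpos : ∀ x ∈ (a :: b :: c :: rest), (1 : Int) ≤ x := by
      rcases hpre with h | h
      · exfalso; omega
      · exact h.1
    have h1 := pvA_char (a :: b :: c :: rest) hpos (by omega)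
    have h2 := pvB_char (a :: b :: c :: rest) (by omega)
    simp only [pvG_reverse] at h1
    have : dp (a :: b :: c :: rest) = true ↔ dp_alt (a :: b :: c :: rest) = true :=
      h1.trans h2.symm
    cases hA : dp (a :: b :: c :: rest) <;> cases hB : dp_alt (a :: b :: c :: rest)
    · rfl
    · rw [hA, hB] at this
      simp at this
    · rw [hA, hB] at this
      simp at this
    · rfl
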